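-- pv_equiv track=rewrite | github.com/daedalus/libciphers | src/libciphers/__init__.py | irregular_columnar_dec
-- ===== SOURCE A (Python) =====
-- import string
--
-- A = string.ascii_uppercase
--
-- def clean(text):
--     """Remove non-alphabetic characters (alias)"""
--     return "".join(c.upper() for c in text if c.upper() in A)
--
-- def irregular_columnar_dec(ct, key):
--     """Irregular columnar transposition"""
--     key = clean(key)
--     if not key:
--         return ct
--     key_order = sorted(range(len(key)), key=lambda i: key[i])
--     cols = len(key)
--     rows = len(ct) // cols + (1 if len(ct) % cols else 0)
--     grid = [
--         list(
--             ct[i * cols : (i + 1) * cols]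
--             + " " * (cols - len(ct[i * cols : (i + 1) * cols]))
--         )
--         for i in range(rows)
--     ]
--     return "".join(
--         grid[r][c] for c in key_order for r in range(rows) if c < len(grid[r])
--     )
-- ===== SOURCE B (Python) =====
-- import string
--
-- A = string.ascii_uppercase
--
-- def clean(text):
--     """Remove non-alphabetic characters (alias)"""
--     return "".join(c.upper() for c in text if c.upper() in A)
--
-- def irregular_columnar_dec(ct, key):
--     """Irregular columnar transposition, without building the grid:
--     each column is a strided slice of the ciphertext, padded to the
--     row count with trailing spaces."""
--     key = clean(key)
--     if not key:
--         return ct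
--     cols = len(key)
--     rows = len(ct) // cols + (1 if len(ct) % cols else 0)
--     out = []
--     for c in sorted(range(cols), key=lambda i: key[i]):
--         col = ct[c::cols]
--         out.append(col + " " * (rows - len(col)))
--     return "".join(out)
-- ===== Notes on version B (the rewrite author's own statement) =====
-- stated objective: alternative
-- what changed: B never builds the row-major padded grid: each plaintext column is extracted directly from the ciphertext with a strided slice ct[c::cols] and padded with trailing spaces to the row count, then the padded columns are concatenated in key order.
import Mathlib
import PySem

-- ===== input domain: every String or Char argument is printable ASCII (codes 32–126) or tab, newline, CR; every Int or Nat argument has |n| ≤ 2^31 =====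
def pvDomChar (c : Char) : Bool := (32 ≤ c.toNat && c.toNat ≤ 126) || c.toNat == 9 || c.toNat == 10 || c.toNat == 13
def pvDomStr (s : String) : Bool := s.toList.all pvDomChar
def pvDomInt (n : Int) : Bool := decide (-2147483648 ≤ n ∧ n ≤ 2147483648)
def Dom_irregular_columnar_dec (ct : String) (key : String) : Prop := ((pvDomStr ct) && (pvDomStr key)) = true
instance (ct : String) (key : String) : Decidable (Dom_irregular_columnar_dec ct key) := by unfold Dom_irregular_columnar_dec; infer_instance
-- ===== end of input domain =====

-- B avoids materialising the padded grid: each column is a strided slice of the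
-- ciphertext padded with trailing spaces (objective: alternative, same cost).

-- ===== PORT A =====
-- Python's str.upper: exact on the ASCII inputs admitted by Dom_ (only 'a'..'z' change there)
def pvUpper (c : Char) : Char := if 'a' ≤ c ∧ c ≤ 'z' then Char.ofNat (c.toNat - 32) else c

def pvA : List Char := "ABCDEFGHIJKLMNOPQRSTUVWXYZ".toList

-- '"".join(c.upper() for c in text if c.upper() in A)'
def pvClean (text : List Char) : List Char :=
  (text.filter (fun c => pvA.contains (pvUpper c))).map pvUpper

def irregular_columnar_dec (ct : String) (key : String) : String :=
  let keyl := pvClean key.toList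
  if keyl = [] then ct
  else
    let ctl := ct.toList
    let key_order := PySem.List.sorted (PySem.List.pyRange 0 (keyl.length : Int) 1)
      (fun i => PySem.List.pyGetD keyl i ' ') false
    let cols : Int := (keyl.length : Int)
    let rows : Int := PySem.Int.floordiv (ctl.length : Int) cols +
      (if PySem.Int.mod (ctl.length : Int) cols ≠ 0 then 1 else 0)
    let grid := (PySem.List.pyRange 0 rows 1).map (fun i =>
      let row := PySem.List.slice ctl (some (i * cols)) (some ((i + 1) * cols))
      row ++ List.replicate ((cols - (row.length : Int)).toNat) ' ')
    String.ofList (key_order.flatMap (fun c =>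
      (PySem.List.pyRange 0 rows 1).filterMap (fun r =>
        let row := PySem.List.pyGetD grid r []
        if c < (row.length : Int) then some (PySem.List.pyGetD row c ' ') else none)))

-- ===== PORT B =====
def irregular_columnar_dec_alt (ct : String) (key : String) : String :=
  let keyl := pvClean key.toList
  if keyl = [] then ct
  else
    let ctl := ct.toList
    let cols : Int := (keyl.length : Int)
    let rows : Int := PySem.Int.floordiv (ctl.length : Int) cols +
      (if PySem.Int.mod (ctl.length : Int) cols ≠ 0 then 1 else 0)
    String.ofList ((PySem.List.sorted (PySem.List.pyRange 0 cols 1)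
        (fun i => PySem.List.pyGetD keyl i ' ') false).flatMap (fun c =>
      let col := (PySem.List.slice? ctl (some c) none cols).getD []
      col ++ List.replicate ((rows - (col.length : Int)).toNat) ' '))

-- ===== PRECONDITION & SPEC =====
def Spec_irregular_columnar_dec (ct : String) (key : String) (out : String) : Prop := out = irregular_columnar_dec_alt ct key
instance (ct : String) (key : String) (out : String) : Decidable (Spec_irregular_columnar_dec ct key out) := by unfold Spec_irregular_columnar_dec; infer_instance

-- ===== CLAIM (what is proved, stated in full; the proofs are below) =====
def Claim_equal_irregular_columnar_dec : Prop := ∀ (ct : String) (key : String), Dom_irregular_columnar_dec ct key → Spec_irregular_columnar_dec ct key (irregular_columnar_dec ct key)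

-- ===== LEMMAS AND PROOFS =====

lemma pvRowget (l : List Char) (a K C : Nat) (hC : C < K) :
    ((l.drop a).take K ++ List.replicate (K - ((l.drop a).take K).length) ' ').getD C ' '
      = l.getD (a + C) ' ' := by
  have hlen : ((l.drop a).take K).length = min K (l.length - a) := by
    simp [List.length_take, List.length_drop]
  simp only [List.getD_eq_getElem?_getD, List.getElem?_append, List.getElem?_replicate,
    List.getElem?_take, List.getElem?_drop, hlen]
  by_cases h : C < min K (l.length - a)
  · simp [h, hC]
  · have hnone : l[a + C]? = none := by
      apply List.getElem?_eq_none
      omega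
    simp only [hnone, Option.getD_none]
    split_ifs <;> simp

lemma pvAcol (l : List Char) (K R C : Nat) (hC : C < K) :
    (PySem.List.pyRange 0 (R:Int) 1).filterMap (fun r =>
      let row := PySem.List.pyGetD ((PySem.List.pyRange 0 (R:Int) 1).map (fun i =>
        let row := PySem.List.slice l (some (i * (K:Int))) (some ((i + 1) * (K:Int)))
        row ++ List.replicate (((K:Int) - (row.length : Int)).toNat) ' ')) r []
      if (C:Int) < (row.length : Int) then some (PySem.List.pyGetD row (C:Int) ' ') else none)
    = (List.range R).map (fun r => l.getD (r * K + C) ' ') := by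
  rw [PySem.List.pyRange_zero_nat, List.filterMap_map]
  have key : ∀ r ∈ List.range R,
      ((fun r => PySem.List.pyGetD (List.map (fun i =>
          PySem.List.slice l (some (i * (K:Int))) (some ((i + 1) * (K:Int))) ++
            List.replicate (((K:Int) - ((PySem.List.slice l (some (i * (K:Int))) (some ((i + 1) * (K:Int)))).length : Int)).toNat) ' ')
          (List.map (fun k : Nat => (k:Int)) (List.range R))) r []) ∘ (fun k : Nat => (k : Int))) r
        = (l.drop (r * K)).take K ++ List.replicate (K - ((l.drop (r * K)).take K).length) ' ' := by
    intro r hr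
    rw [List.mem_range] at hr
    simp only [Function.comp_apply]
    rw [← PySem.List.pyRange_zero_nat, PySem.List.pyGetD_map_pyRange _ _ _ _ hr]
    have h1 : (r:Int) * (K:Int) = ((r * K : Nat) : Int) := by push_cast; ring
    have h2 : ((r:Int) + 1) * (K:Int) = ((r * K + K : Nat) : Int) := by push_cast; ring
    rw [h1, h2, PySem.List.slice_natCast]
    have h3 : r * K + K - r * K = K := by omega
    rw [h3]
    congr 1
    have h4 : ((l.drop (r * K)).take K).length ≤ K := by simp
    congr 1
    omega
  have key2 : ∀ r ∈ List.range R,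
      ((fun r =>
        let row := PySem.List.pyGetD (List.map (fun i =>
          let row := PySem.List.slice l (some (i * (K:Int))) (some ((i + 1) * (K:Int)))
          row ++ List.replicate (((K:Int) - (row.length : Int)).toNat) ' ') (List.map (fun k : Nat => (k:Int)) (List.range R))) r []
        if (C:Int) < (row.length : Int) then some (PySem.List.pyGetD row (C:Int) ' ') else none) ∘ (fun k : Nat => (k : Int))) r
        = some (l.getD (r * K + C) ' ') := by
    intro r hr
    simp only [Function.comp_apply]
    have hrow := key r hr
    simp only [Function.comp_apply] at hrow
    rw [hrow]
    have hlen : ((l.drop (r * K)).take K ++ List.replicate (K - ((l.drop (r * K)).take K).length) ' ').length = K := by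
      have : ((l.drop (r * K)).take K).length ≤ K := by simp
      simp only [List.length_append, List.length_replicate]
      omega
    rw [hlen, if_pos (by exact_mod_cast hC), PySem.List.pyGetD_natCast, pvRowget l (r * K) K C hC]
  rw [List.filterMap_congr key2]
  have : (fun r : Nat => some (l.getD (r * K + C) ' ')) = some ∘ (fun r : Nat => l.getD (r * K + C) ' ') := rfl
  rw [this, List.filterMap_eq_map]

lemma pvBcol (l : List Char) (K R C : Nat) (hK : 0 < K) (hC : C < K) (hR : l.length ≤ K * R) :
    (let col := (PySem.List.slice? l (some (C:Int)) none (K:Int)).getD []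
     col ++ List.replicate (((R:Int) - (col.length : Int)).toNat) ' ')
    = (List.range R).map (fun r => l.getD (r * K + C) ' ') := by
  have hKz : (K:Int) ≠ 0 := by exact_mod_cast hK.ne'
  set n := l.length with hn
  set L : Nat := (n - C + K - 1) / K with hL
  have hdm : K * L + (n - C + K - 1) % K = n - C + K - 1 := by
    rw [hL]; exact Nat.div_add_mod (n - C + K - 1) K
  have hms : (n - C + K - 1) % K < K := Nat.mod_lt _ hK
  have hKL : n - C ≤ K * L := by omega
  have hLR : L ≤ R := by
    have h1 : L < R + 1 := by
      rw [hL]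
      apply (Nat.div_lt_iff_lt_mul hK).mpr
      have h2 : (R + 1) * K = K * R + K := by ring
      omega
    omega
  have hcol : (PySem.List.slice? l (some (C:Int)) none (K:Int)).getD []
      = (List.range L).map (fun k => l.getD (C + K * k) ' ') := by
    have hKn : ¬ ((K:Int) < 0) := by omega
    have hCn0 : ¬ ((C:Int) < 0) := by omega
    have hKp : (0:Int) < (K:Int) := by exact_mod_cast hK
    simp only [PySem.List.slice?, PySem.List.sliceIndices, if_neg hKz, if_neg hKn,
      if_neg hCn0, if_pos hKp, Option.getD_some]
    by_cases hCn : C < n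
    · have hmin : min (C:Int) (l.length:Int) = (C:Int) := by
        rw [min_eq_left]; omega
      rw [hmin, if_pos (by omega : (C:Int) < (l.length:Int))]
      have hcnt : ((((l.length:Int) - (C:Int)) + (K:Int) - 1) / (K:Int)).toNat = L := by
        have he : (((l.length:Int) - (C:Int)) + (K:Int) - 1) = ((n - C + K - 1 : Nat) : Int) := by
          omega
        rw [he, ← Int.natCast_ediv, Int.toNat_natCast, hL]
      rw [hcnt]
      have hsome : ∀ x ∈ List.range L,
          l[((C:Int) + (K:Int) * (x:Nat)).toNat]? = some (l.getD (C + K * x) ' ') := by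
        intro x hx
        rw [List.mem_range] at hx
        have hmul : K * (x + 1) ≤ K * L := Nat.mul_le_mul_left K hx
        have hexp : K * (x + 1) = K * x + K := by ring
        have hidx : C + K * x < n := by omega
        rw [show ((C:Int) + (K:Int) * ((x:Nat):Int)) = ((C + K * x : Nat) : Int) by push_cast; ring,
          Int.toNat_natCast, List.getElem?_eq_getElem (by omega), List.getD_eq_getElem l ' ' (by omega)]
      rw [List.filterMap_congr hsome,
        show (fun x : Nat => some (l.getD (C + K * x) ' ')) = some ∘ (fun x : Nat => l.getD (C + K * x) ' ') from rfl,
        List.filterMap_eq_map]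
    · have hmin : min (C:Int) (l.length:Int) = (l.length:Int) := by
        rw [min_eq_right]; omega
      rw [hmin, if_neg (by omega : ¬ ((l.length:Int) < (l.length:Int)))]
      have hL0 : L = 0 := by
        rw [hL]; apply Nat.div_eq_of_lt; omega
      rw [hL0]
      simp
  simp only [hcol]
  have hlenc : ((List.range L).map (fun k => l.getD (C + K * k) ' ')).length = L := by simp
  rw [hlenc]
  have hpad : (((R:Int)) - ((L:Nat):Int)).toNat = R - L := by omega
  rw [hpad]
  apply List.ext_getElem
  · simp; omega
  · intro i h1 h2
    simp only [List.getElem_map, List.getElem_range] at *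
    by_cases hiL : i < L
    · rw [List.getElem_append_left (by simpa using hiL)]
      simp only [List.getElem_map, List.getElem_range]
      congr 1
      ring
    · rw [List.getElem_append_right (by simpa using hiL)]
      simp only [List.getElem_replicate]
      have hge : n ≤ i * K + C := by
        have := Nat.mul_le_mul_left K (Nat.le_of_not_lt hiL)
        have h3 : i * K = K * i := by ring
        omega
      rw [List.getD_eq_getElem?_getD, List.getElem?_eq_none (by omega)]
      simp

theorem pv_main : ∀ (ct key : String),
    irregular_columnar_dec ct key = irregular_columnar_dec_alt ct key := by
  intro ct key
  unfold irregular_columnar_dec irregular_columnar_dec_alt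
  by_cases hk : pvClean key.toList = []
  · simp [hk]
  · simp only [if_neg hk]
    set keyl := pvClean key.toList with hkeyl
    set l := ct.toList with hl
    set K := keyl.length with hK
    set n := l.length with hn
    have hKpos : 0 < K := by
      rcases keyl with _ | _
      · exact absurd rfl hk
      · simp [hK]
    set R : Nat := n / K + (if n % K ≠ 0 then 1 else 0) with hR
    have hrows : PySem.Int.floordiv (n:Int) (K:Int) +
        (if PySem.Int.mod (n:Int) (K:Int) ≠ 0 then 1 else 0) = ((R:Nat) : Int) := by
      rw [PySem.Int.floordiv_natCast, PySem.Int.mod_natCast, hR]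
      by_cases h : n % K = 0 <;> simp [h] <;> omega
    have hnKR : n ≤ K * R := by
      have hdm := Nat.div_add_mod n K
      by_cases h : n % K = 0
      · rw [hR]
        simp [h]
        omega
      · rw [hR]
        rw [if_pos h]
        have : K * (n / K + 1) = K * (n / K) + K := by ring
        have hlt := Nat.mod_lt n hKpos
        omega
    rw [hrows]
    refine congrArg String.ofList (List.flatMap_congr ?_)
    intro c hc
    rw [PySem.List.mem_sorted, PySem.List.mem_pyRange_one] at hc
    obtain ⟨hc0, hcK⟩ := hc
    set C := c.toNat with hCdef
    have hcC : c = (C : Int) := by omega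
    have hCK : C < K := by omega
    rw [hcC]
    rw [pvAcol l K R C hCK, pvBcol l K R C hKpos hCK hnKR]


-- ===== VERDICT (by name: the statement is the Claim_ definition above) =====
theorem irregular_columnar_dec_spec : Claim_equal_irregular_columnar_dec := by
  intro ct key _
  unfold Spec_irregular_columnar_dec
  exact pv_main ct key
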